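-- pv_equiv track=rewrite | github.com/Geunbaek/boj | 프로그래머스/2/258711. 도넛과 막대 그래프/도넛과 막대 그래프.py | solution
-- ===== SOURCE A (Python) =====
-- from collections import defaultdict, deque
--
-- def solution(edges):
--     def check(start):
--         q = deque([start])
--         visited = set([start])
--         is_cycle = False
--         edge = 0
--
--         while q:
--             now = q.popleft()
--             for _next in graph[now]:
--                 edge += 1
--                 if _next in visited:
--                     is_cycle = True
--                     continue
--                 visited.add(_next)
--                 q.append(_next)
--
--         if not is_cycle:
--             return 2
--         if len(visited) == edge:
--             return 1
--         return 3
--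
--     edge_set = set()
--     degrees = defaultdict(int)
--     graph = defaultdict(list)
--
--     for u, v in edges:
--         edge_set.add(u)
--         edge_set.add(v)
--         graph[u].append(v)
--         degrees[v] += 1
--
--     answer = [0, 0, 0, 0]
--     for i in edge_set:
--         if not degrees[i] and len(graph[i]) != 1:
--             answer[0] = i
--
--     nodes = []
--
--     for v in graph[answer[0]]:
--         degrees[v] -= 1
--         nodes.append(v)
--
--
--     for node in nodes:
--         answer[check(node)] += 1
--
--     return answer
-- ===== SOURCE B (Python) =====
-- def _region(out, start):
--     seen = {start}
--     stack = [start]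
--     while stack:
--         x = stack.pop()
--         for y in out.get(x, []):
--             if y not in seen:
--                 seen.add(y)
--                 stack.append(y)
--     return len(seen), sum(len(out.get(x, [])) for x in seen)
--
--
-- def solution(edges):
--     out = {}
--     indeg = {}
--     for u, v in edges:
--         out.setdefault(u, []).append(v)
--         indeg[v] = indeg.get(v, 0) + 1
--     gen = 0
--     for u in out:
--         if indeg.get(u, 0) == 0 and len(out[u]) != 1:
--             gen = u
--             break
--     counts = [gen, 0, 0, 0]
--     for c in out.get(gen, []):
--         n, m = _region(out, c)
--         counts[2 if m == n - 1 else 1 if m == n else 3] += 1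
--     return counts
-- ===== Notes on version B (the rewrite author's own statement) =====
-- stated objective: alternative
-- what changed: A classifies each component by a BFS that carries a running edge counter and a cycle flag through a deque; B does a plain DFS with an explicit stack that only collects the reachable set and then classifies arithmetically from two numbers computed afterwards (n = |reachable|, m = sum of out-degrees over it): stick iff m = n-1, donut iff m = n, figure-eight otherwise.
-- outside the precondition, e.g. on solution([[1, 2], [1, 3], [4, 5], [4, 6]]): A returns [4, 0, 2, 0], B returns [1, 0, 2, 0]
import Mathlib
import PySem

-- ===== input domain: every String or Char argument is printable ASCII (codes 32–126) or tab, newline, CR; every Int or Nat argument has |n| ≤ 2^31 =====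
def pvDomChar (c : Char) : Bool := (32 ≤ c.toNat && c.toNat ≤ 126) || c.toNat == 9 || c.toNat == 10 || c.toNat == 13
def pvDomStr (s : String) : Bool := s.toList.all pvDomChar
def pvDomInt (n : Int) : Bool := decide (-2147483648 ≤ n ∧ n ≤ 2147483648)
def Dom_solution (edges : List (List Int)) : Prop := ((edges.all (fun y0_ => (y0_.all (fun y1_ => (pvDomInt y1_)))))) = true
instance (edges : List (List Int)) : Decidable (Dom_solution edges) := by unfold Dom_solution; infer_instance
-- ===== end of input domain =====

-- B replaces A's BFS-with-cycle-flag-and-edge-counter by a stack DFS that only collects the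
-- reachable set and classifies arithmetically from its size and total out-degree (objective:
-- alternative, same cost). Equality of return values is proved on Pre_solution.

-- ===== PORT A =====
-- for u, v in edges: edge_set.add(u); edge_set.add(v); graph[u].append(v); degrees[v] += 1
-- (rows that are not 2-element lists raise in Python: excluded by Pre_solution; the port skips them)
def buildA (edges : List (List Int)) :
    PySem.Set Int × PySem.Dict Int (List Int) × PySem.Dict Int Int :=
  edges.foldl
    (fun st e =>
      match e with
      | [u, v] =>
          ((st.1.add u).add v,
           st.2.1.modify u [] (fun l => l ++ [v]),
           st.2.2.modify v 0 (fun n => n + 1))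
      | _ => st)
    (PySem.Set.empty, PySem.Dict.empty, PySem.Dict.empty)

-- the while-q loop of check: state (q, visited, edge, is_cycle); fuel only makes the
-- recursion structural (proved sufficient below, so the 'none' branch is never taken)
def bfsA (g : PySem.Dict Int (List Int)) :
    Nat → List Int → PySem.Set Int → Int → Bool → Option (PySem.Set Int × Int × Bool)
  | _, [], vis, edge, cyc => some (vis, edge, cyc)
  | 0, _ :: _, _, _, _ => none
  | fuel + 1, now :: q, vis, edge, cyc =>
      let st := (g.getD now []).foldl
        (fun (s : List Int × PySem.Set Int × Int × Bool) nxt =>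
          if s.2.1.contains nxt then (s.1, s.2.1, s.2.2.1 + 1, true)
          else (s.1 ++ [nxt], s.2.1.add nxt, s.2.2.1 + 1, s.2.2.2))
        (q, vis, edge, cyc)
      bfsA g fuel st.1 st.2.1 st.2.2.1 st.2.2.2

def checkA (g : PySem.Dict Int (List Int)) (fuel : Nat) (start : Int) : Int :=
  match bfsA g fuel [start] (PySem.Set.add PySem.Set.empty start) 0 false with
  | none => 3
  | some (vis, edge, cyc) =>
      if cyc = false then 2
      else if (vis.length : Int) = edge then 1
      else 3

def solution (edges : List (List Int)) : List Int :=
  let st := buildA edges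
  let edgeSet := st.1
  let graph := st.2.1
  let degrees := st.2.2
  -- for i in edge_set: if not degrees[i] and len(graph[i]) != 1: answer[0] = i
  -- (Python iterates the set in hash order; Pre_solution makes the result order-independent)
  let a0 := edgeSet.foldl
    (fun acc i => if degrees.getD i 0 = 0 ∧ (graph.getD i []).length ≠ 1 then i else acc) 0
  let nodes := graph.getD a0 []
  -- for v in graph[answer[0]]: degrees[v] -= 1  (degrees is never read again)
  let _degrees2 := nodes.foldl (fun d v => d.modify v 0 (fun n => n - 1)) degrees
  -- for node in nodes: answer[check(node)] += 1  (check returns 1, 2 or 3)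
  let cnt := nodes.foldl
    (fun (c : Int × Int × Int) node =>
      match checkA graph (2 * edges.length + 1) node with
      | 1 => (c.1 + 1, c.2.1, c.2.2)
      | 2 => (c.1, c.2.1 + 1, c.2.2)
      | _ => (c.1, c.2.1, c.2.2 + 1))
    (0, 0, 0)
  [a0, cnt.1, cnt.2.1, cnt.2.2]

-- ===== PORT B =====
-- for u, v in edges: out.setdefault(u, []).append(v); indeg[v] = indeg.get(v, 0) + 1
def buildB (edges : List (List Int)) : PySem.Dict Int (List Int) × PySem.Dict Int Int :=
  edges.foldl
    (fun st e =>
      match e with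
      | [u, v] =>
          ((st.1.setdefault u []).modify u [] (fun l => l ++ [v]),
           st.2.insert v (st.2.getD v 0 + 1))
      | _ => st)
    (PySem.Dict.empty, PySem.Dict.empty)

-- the while-stack loop of _region: stack.pop() pops the LAST element
-- (getLastD is only read on a non-empty list); fuel as in bfsA
def dfsB (out : PySem.Dict Int (List Int)) :
    Nat → List Int → PySem.Set Int → Option (PySem.Set Int)
  | _, [], seen => some seen
  | 0, _ :: _, _ => none
  | fuel + 1, s :: stack, seen =>
      let x := (s :: stack).getLastD 0
      let st := (out.getD x []).foldl
        (fun (s : List Int × PySem.Set Int) y =>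
          if s.2.contains y then s else (s.1 ++ [y], s.2.add y))
        ((s :: stack).dropLast, seen)
      dfsB out fuel st.1 st.2

-- _region: returns (len(seen), sum(len(out.get(x, [])) for x in seen))
def regionB (out : PySem.Dict Int (List Int)) (fuel : Nat) (start : Int) : Option (Int × Int) :=
  match dfsB out fuel [start] (PySem.Set.add PySem.Set.empty start) with
  | none => none
  | some seen =>
      some ((seen.length : Int), (seen.map (fun x => ((out.getD x []).length : Int))).sum)

def solution_alt (edges : List (List Int)) : List Int :=
  let st := buildB edges
  let out := st.1
  let indeg := st.2
  -- first key of out with indeg 0 and out-degree != 1 (for … break), else 0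
  let gen := match out.keys.find? (fun u => indeg.getD u 0 == 0 && (out.getD u []).length != 1) with
    | some u => u
    | none => 0
  let cnt := (out.getD gen []).foldl
    (fun (c : Int × Int × Int) ch =>
      match regionB out (2 * edges.length + 1) ch with
      | none => c
      | some (n, m) =>
          if m = n - 1 then (c.1, c.2.1 + 1, c.2.2)
          else if m = n then (c.1 + 1, c.2.1, c.2.2)
          else (c.1, c.2.1, c.2.2 + 1))
    (0, 0, 0)
  [gen, cnt.1, cnt.2.1, cnt.2.2]

-- ===== PRECONDITION & SPEC =====
-- c is a "generation" candidate: c never occurs as an edge target, and is the source of ≠ 1 edges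
def candP (edges : List (List Int)) (c : Int) : Bool :=
  edges.all (fun e => e.getD 1 0 != c) && edges.countP (fun e => e.headI == c) != 1
-- Pre_ excludes (a) rows that are not 2-element lists, on which A's 'for u, v in edges' raises,
-- and (b) inputs with two or more generation candidates, on which A's answer[0] is an accident of
-- Python's set-iteration (hash) order, which PySem does not model.
def Pre_solution (edges : List (List Int)) : Prop :=
  (∀ e ∈ edges, e.length = 2) ∧
  (PySem.List.dedup edges.flatten).countP (fun c => candP edges c) ≤ 1
instance (edges : List (List Int)) : Decidable (Pre_solution edges) := by
  unfold Pre_solution; infer_instance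
def pvWitness_solution : List (List Int) := [[0, 1], [1, 0]]
def Spec_solution (edges : List (List Int)) (out : List Int) : Prop := out = solution_alt edges
instance (edges : List (List Int)) (out : List Int) : Decidable (Spec_solution edges out) := by
  unfold Spec_solution; infer_instance

-- ===== CLAIM (what is proved, stated in full; the proofs are below) =====
def Claim_equal_solution : Prop :=
  ∀ (edges : List (List Int)), Dom_solution edges → Pre_solution edges →
    Spec_solution edges (solution edges)

-- ===== LEMMAS AND PROOFS =====

-- sources / targets / adjacency list of the well-formed rows
def headsOf (edges : List (List Int)) : List Int :=
  edges.filterMap (fun e => match e with | [u, _] => some u | _ => none)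
def secOf (edges : List (List Int)) : List Int :=
  edges.filterMap (fun e => match e with | [_, v] => some v | _ => none)
def adjOf (edges : List (List Int)) (x : Int) : List Int :=
  edges.filterMap (fun e => match e with | [u, v] => if u = x then some v else none | _ => none)

-- the sublist of ns that a visited-set fold actually adds (in order)
def freshOf (vis ns : List Int) : List Int :=
  match ns with
  | [] => []
  | n :: ns => if vis.contains n then freshOf vis ns else n :: freshOf (vis ++ [n]) ns

def sumW (g : PySem.Dict Int (List Int)) (l : List Int) : Int :=
  (l.map (fun x => ((g.getD x []).length : Int))).sum

def Reach (g : PySem.Dict Int (List Int)) : Int → Int → Prop :=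
  Relation.ReflTransGen (fun a b => b ∈ g.getD a [])

structure TInv (g : PySem.Dict Int (List Int)) (U : List Int) (s0 : Int)
    (vis pend : List Int) : Prop where
  visNd : vis.Nodup
  pendNd : pend.Nodup
  pendSub : ∀ p ∈ pend, p ∈ vis
  closed : ∀ x ∈ vis, x ∉ pend → ∀ y ∈ g.getD x [], y ∈ vis
  visSub : ∀ x ∈ vis, x = s0 ∨ x ∈ U

-- ---- freshOf facts ----
lemma freshOf_sub : ∀ ns vis x, x ∈ freshOf vis ns → x ∈ ns := by
  intro ns
  induction ns with
  | nil => simp [freshOf]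
  | cons n ns ih =>
      intro vis x h
      rw [freshOf] at h
      split at h
      · exact List.mem_cons_of_mem _ (ih _ _ h)
      · rcases List.mem_cons.1 h with h | h
        · simp [h]
        · exact List.mem_cons_of_mem _ (ih _ _ h)

lemma freshOf_not_vis : ∀ ns vis x, x ∈ freshOf vis ns → x ∉ vis := by
  intro ns
  induction ns with
  | nil => simp [freshOf]
  | cons n ns ih =>
      intro vis x h
      rw [freshOf] at h
      split at h
      · exact ih _ _ h
      · rename_i hc
        rcases List.mem_cons.1 h with h | h
        · subst h; simpa using hc
        · intro hx
          exact ih _ _ h (by simp [hx])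

lemma mem_append_freshOf : ∀ ns vis x, x ∈ vis ++ freshOf vis ns ↔ x ∈ vis ∨ x ∈ ns := by
  intro ns
  induction ns with
  | nil => simp [freshOf]
  | cons n ns ih =>
      intro vis x
      rw [freshOf]
      split
      · rename_i hc
        rw [ih]
        constructor
        · rintro (h | h) <;> simp [h]
        · rintro (h | h)
          · exact Or.inl h
          · rcases List.mem_cons.1 h with h | h
            · subst h; exact Or.inl (by simpa using hc)
            · exact Or.inr h
      · rw [List.append_cons]
        rw [ih]
        simp only [List.mem_append, List.mem_cons]
        tauto

lemma nodup_append_freshOf : ∀ ns vis, vis.Nodup → (vis ++ freshOf vis ns).Nodup := by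
  intro ns
  induction ns with
  | nil => simpa [freshOf] using fun _ h => h
  | cons n ns ih =>
      intro vis hnd
      rw [freshOf]
      split
      · exact ih _ hnd
      · rename_i hc
        rw [List.append_cons]
        have hn : n ∉ vis := by simpa using hc
        exact ih (vis ++ [n])
          (((List.perm_append_singleton n vis).nodup_iff).2 (List.nodup_cons.mpr ⟨hn, hnd⟩))

lemma freshOf_length_le : ∀ ns vis, (freshOf vis ns).length ≤ ns.length := by
  intro ns
  induction ns with
  | nil => simp [freshOf]
  | cons n ns ih =>
      intro vis
      rw [freshOf]
      split
      · exact Nat.le_succ_of_le (ih _)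
      · simpa using ih (vis ++ [n])

-- ---- inner folds ----
lemma innerA (ns : List Int) : ∀ (q vis : List Int) (edge : Int) (cyc : Bool),
    ns.foldl
      (fun (s : List Int × PySem.Set Int × Int × Bool) nxt =>
        if s.2.1.contains nxt then (s.1, s.2.1, s.2.2.1 + 1, true)
        else (s.1 ++ [nxt], s.2.1.add nxt, s.2.2.1 + 1, s.2.2.2))
      (q, vis, edge, cyc)
    = (q ++ freshOf vis ns, vis ++ freshOf vis ns, edge + ns.length,
        cyc || decide ((freshOf vis ns).length ≠ ns.length)) := by
  induction ns with
  | nil => simp [freshOf]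
  | cons n ns ih =>
      intro q vis edge cyc
      cases hc : List.contains vis n with
      | true =>
          have hf : freshOf vis (n :: ns) = freshOf vis ns := by rw [freshOf, if_pos hc]
          have hlen : (freshOf vis ns).length ≠ ns.length + 1 := by
            have := freshOf_length_le ns vis; omega
          rw [List.foldl_cons]
          show List.foldl _ (if PySem.Set.contains vis n = true then _ else _) ns = _
          rw [if_pos (show PySem.Set.contains vis n = true from hc), ih, hf]
          simp only [Prod.mk.injEq, true_and, List.length_cons]
          refine ⟨by omega, ?_⟩
          simp [hlen]
      | false =>
          have hf : freshOf vis (n :: ns) = n :: freshOf (vis ++ [n]) ns := by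
            rw [freshOf, if_neg (by simpa using hc)]
          rw [List.foldl_cons]
          show List.foldl _ (if PySem.Set.contains vis n = true then _ else _) ns = _
          rw [if_neg (by simpa using (show List.contains vis n = false from hc)),
            show PySem.Set.add vis n = vis ++ [n] by
              simp only [PySem.Set.add, PySem.Set.contains, hc, Bool.false_eq_true, if_false],
            ih, hf]
          simp only [List.append_assoc, List.singleton_append, Prod.mk.injEq, true_and, List.length_cons]
          exact ⟨by omega, congrArg (fun b => cyc || b) (decide_eq_decide.mpr (by omega))⟩

lemma innerB (ns : List Int) : ∀ (q vis : List Int),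
    ns.foldl
      (fun (s : List Int × PySem.Set Int) y =>
        if s.2.contains y then s else (s.1 ++ [y], s.2.add y))
      (q, vis)
    = (q ++ freshOf vis ns, vis ++ freshOf vis ns) := by
  induction ns with
  | nil => simp [freshOf]
  | cons n ns ih =>
      intro q vis
      cases hc : List.contains vis n with
      | true =>
          have hf : freshOf vis (n :: ns) = freshOf vis ns := by rw [freshOf, if_pos hc]
          rw [List.foldl_cons]
          show List.foldl _ (if PySem.Set.contains vis n = true then _ else _) ns = _
          rw [if_pos (show PySem.Set.contains vis n = true from hc), ih, hf]
      | false =>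
          have hf : freshOf vis (n :: ns) = n :: freshOf (vis ++ [n]) ns := by
            rw [freshOf, if_neg (by simpa using hc)]
          rw [List.foldl_cons]
          show List.foldl _ (if PySem.Set.contains vis n = true then _ else _) ns = _
          rw [if_neg (by simpa using (show List.contains vis n = false from hc)),
            show PySem.Set.add vis n = vis ++ [n] by
              simp only [PySem.Set.add, PySem.Set.contains, hc, Bool.false_eq_true, if_false],
            ih, hf]
          simp [List.append_assoc]

-- ---- reachability ----
lemma reach_closed (g : PySem.Dict Int (List Int)) (S : Int → Prop)
    (hS : ∀ z, S z → ∀ y ∈ g.getD z [], S y) {a x : Int} (ha : S a) (h : Reach g a x) : S x := by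
  induction h with
  | refl => exact ha
  | tail _ h2 ih => exact hS _ ih _ h2

lemma frontier_exchange (g : PySem.Dict Int (List Int)) (vis fresh rest : List Int) (p : Int)
    (hp : p ∈ vis)
    (hcl : ∀ x ∈ vis, x ∉ rest → x ≠ p → ∀ y ∈ g.getD x [], y ∈ vis)
    (hadjp : ∀ y ∈ g.getD p [], y ∈ vis ∨ y ∈ fresh)
    (hfr : ∀ y ∈ fresh, y ∈ g.getD p []) (x : Int) :
    ((x ∈ vis ∨ x ∈ fresh) ∨ ∃ q, (q ∈ rest ∨ q ∈ fresh) ∧ Reach g q x)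
      ↔ (x ∈ vis ∨ ∃ q, (q = p ∨ q ∈ rest) ∧ Reach g q x) := by
  constructor
  · rintro ((h | h) | ⟨q, hq, hr⟩)
    · exact Or.inl h
    · exact Or.inr ⟨p, Or.inl rfl, Relation.ReflTransGen.single (hfr _ h)⟩
    · rcases hq with hq | hq
      · exact Or.inr ⟨q, Or.inr hq, hr⟩
      · exact Or.inr ⟨p, Or.inl rfl,
          Relation.ReflTransGen.trans (Relation.ReflTransGen.single (hfr _ hq)) hr⟩
  · rintro (h | ⟨q, hq, hr⟩)
    · exact Or.inl (Or.inl h)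
    · rcases hq with hq0 | hq
      · rw [hq0] at hr
        refine reach_closed g
            (fun z => (z ∈ vis ∨ z ∈ fresh) ∨ ∃ q, (q ∈ rest ∨ q ∈ fresh) ∧ Reach g q z)
            ?_ (Or.inl (Or.inl hp)) hr
        rintro z ((hz | hz) | ⟨q, hq2, hr2⟩) y hy
        · by_cases hzr : z ∈ rest
          · exact Or.inr ⟨z, Or.inl hzr, Relation.ReflTransGen.single hy⟩
          · by_cases hzp : z = p
            · subst hzp
              rcases hadjp y hy with h | h
              · exact Or.inl (Or.inl h)
              · exact Or.inl (Or.inr h)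
            · exact Or.inl (Or.inl (hcl z hz hzr hzp y hy))
        · exact Or.inr ⟨z, Or.inr hz, Relation.ReflTransGen.single hy⟩
        · exact Or.inr ⟨q, hq2, hr2.tail hy⟩
      · exact Or.inr ⟨q, Or.inl hq, hr⟩

-- ---- fuel bookkeeping ----
lemma unvisited_drop (U vis fresh : List Int) (hnd : U.Nodup) (hfnd : fresh.Nodup)
    (hsub : ∀ x ∈ fresh, x ∈ U) (hdis : ∀ x ∈ fresh, x ∉ vis) :
    (U.filter (fun x => decide (x ∉ vis ++ fresh))).length + fresh.length
      ≤ (U.filter (fun x => decide (x ∉ vis))).length := by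
  classical
  have hsplit : U.filter (fun x => decide (x ∉ vis ++ fresh))
      = (U.filter (fun x => decide (x ∉ vis))).filter (fun x => decide (x ∉ fresh)) := by
    rw [List.filter_filter]
    apply List.filter_congr
    intro x _
    simp only [List.mem_append, decide_not]
    cases h1 : decide (x ∈ vis) <;> cases h2 : decide (x ∈ fresh) <;> simp_all
  have hAnd : (U.filter (fun x => decide (x ∉ vis))).Nodup := hnd.filter _
  have hperm :
      ((U.filter (fun x => decide (x ∉ vis))).filter (fun x => decide (x ∈ fresh))).Perm fresh := by
    refine (List.perm_ext_iff_of_nodup (hAnd.filter _) hfnd).mpr ?_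
    intro a
    simp only [List.mem_filter, decide_eq_true_eq]
    constructor
    · rintro ⟨-, h⟩; exact h
    · intro ha
      exact ⟨⟨hsub a ha, by simpa using hdis a ha⟩, ha⟩
  have hlen : ((U.filter (fun x => decide (x ∉ vis))).filter (fun x => decide (x ∈ fresh))).length
        + ((U.filter (fun x => decide (x ∉ vis))).filter (fun x => decide (x ∉ fresh))).length
      = (U.filter (fun x => decide (x ∉ vis))).length := by
    have := (List.length_eq_length_filter_add
      (l := U.filter (fun x => decide (x ∉ vis))) (fun x => decide (x ∈ fresh))).symm
    simpa using this
  have hfl := hperm.length_eq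
  rw [hsplit]
  omega

lemma foldl_add_length_le : ∀ (l : List Int) (s : PySem.Set Int),
    (l.foldl PySem.Set.add s).length ≤ s.length + l.length := by
  intro l
  induction l with
  | nil => simp
  | cons x l ih =>
      intro s
      rw [List.foldl_cons]
      refine (ih (s.add x)).trans ?_
      have : (s.add x).length ≤ s.length + 1 := by
        rw [PySem.Set.add]
        split <;> simp
      simp only [List.length_cons]
      omega

lemma dedup_length_le (l : List Int) : (PySem.List.dedup l).length ≤ l.length := by
  have h : PySem.List.dedup l = l.foldl PySem.Set.add [] := by simp [PySem.Set.ofList_eq_foldl]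
  rw [h]
  simpa using foldl_add_length_le l []

-- ---- main traversal lemmas ----
lemma sumW_append (g : PySem.Dict Int (List Int)) (a b : List Int) :
    sumW g (a ++ b) = sumW g a + sumW g b := by
  simp [sumW]

lemma sumW_cons (g : PySem.Dict Int (List Int)) (x : Int) (a : List Int) :
    sumW g (x :: a) = ((g.getD x []).length : Int) + sumW g a := by
  simp [sumW]

lemma bfsA_done (g : PySem.Dict Int (List Int)) (fuel : Nat) (vis : PySem.Set Int)
    (edge : Int) (cyc : Bool) : bfsA g fuel [] vis edge cyc = some (vis, edge, cyc) := by
  cases fuel <;> rfl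

lemma dfsB_done (g : PySem.Dict Int (List Int)) (fuel : Nat) (vis : PySem.Set Int) :
    dfsB g fuel [] vis = some vis := by
  cases fuel <;> rfl

lemma bfsA_run (g : PySem.Dict Int (List Int)) (U : List Int) (s0 : Int)
    (hadj : ∀ x y, y ∈ g.getD x [] → y ∈ U) :
    ∀ fuel (pend vis : List Int) (edge : Int) (cyc : Bool),
    TInv g U s0 vis pend →
    edge + sumW g pend = sumW g vis →
    cyc = decide (edge ≠ (vis.length : Int) - 1) →
    (vis.length : Int) - 1 ≤ edge →
    pend.length + 2 * ((PySem.List.dedup U).filter (fun x => decide (x ∉ vis))).length ≤ fuel →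
    ∃ vis' : List Int,
      bfsA g fuel pend vis edge cyc =
        some (vis', sumW g vis', decide (sumW g vis' ≠ (vis'.length : Int) - 1)) ∧
      vis'.Nodup ∧ (∀ x, x ∈ vis' ↔ x ∈ vis ∨ ∃ p, p ∈ pend ∧ Reach g p x) := by
  intro fuel
  induction fuel with
  | zero =>
      intro pend vis edge cyc hinv hE hC _hle hfuel
      cases pend with
      | nil =>
          refine ⟨vis, ?_, hinv.visNd, by simp⟩
          rw [bfsA_done]
          have he : edge = sumW g vis := by
            have : sumW g ([] : List Int) = 0 := by simp [sumW]
            omega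
          rw [← he, ← hC]
      | cons p rest => simp at hfuel
  | succ f ih =>
      intro pend vis edge cyc hinv hE hC hle hfuel
      cases pend with
      | nil =>
          refine ⟨vis, ?_, hinv.visNd, by simp⟩
          rw [bfsA_done]
          have he : edge = sumW g vis := by
            have : sumW g ([] : List Int) = 0 := by simp [sumW]
            omega
          rw [← he, ← hC]
      | cons p rest =>
          set ns := g.getD p [] with hns
          set fresh := freshOf vis ns with hfresh
          have hfr_sub : ∀ y ∈ fresh, y ∈ ns := fun y hy => freshOf_sub ns vis y hy
          have hfr_nvis : ∀ y ∈ fresh, y ∉ vis := fun y hy => freshOf_not_vis ns vis y hy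
          have hmem : ∀ x, x ∈ vis ++ fresh ↔ x ∈ vis ∨ x ∈ ns :=
            fun x => mem_append_freshOf ns vis x
          have hnd' : (vis ++ fresh).Nodup := nodup_append_freshOf ns vis hinv.visNd
          have hfnd : fresh.Nodup := hnd'.of_append_right
          have hp_vis : p ∈ vis := hinv.pendSub p (List.mem_cons_self)
          have hrestNd : rest.Nodup := (List.nodup_cons.mp hinv.pendNd).2
          have hpnotrest : p ∉ rest := (List.nodup_cons.mp hinv.pendNd).1
          have hfle : fresh.length ≤ ns.length := freshOf_length_le ns vis
          have hadjp : ∀ y ∈ ns, y ∈ vis ∨ y ∈ fresh := by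
            intro y hy
            exact List.mem_append.mp ((hmem y).mpr (Or.inr hy))
          -- new invariant
          have hinv' : TInv g U s0 (vis ++ fresh) (rest ++ fresh) := by
            refine ⟨hnd', ?_, ?_, ?_, ?_⟩
            · rw [List.nodup_append]
              exact ⟨hrestNd, hfnd, fun a ha b hb hab =>
                hfr_nvis b hb (hab ▸ hinv.pendSub a (List.mem_cons_of_mem p ha))⟩
            · intro q hq
              rcases List.mem_append.mp hq with h | h
              · exact List.mem_append_left _ (hinv.pendSub q (List.mem_cons_of_mem p h))
              · exact List.mem_append_right _ h
            · intro x hx hnp y hy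
              rcases List.mem_append.mp hx with hxv | hxf
              · by_cases hxp : x = p
                · subst hxp
                  exact (hmem y).mpr (Or.inr hy)
                · have hxr : x ∉ rest := fun h => hnp (List.mem_append_left _ h)
                  have : x ∉ p :: rest := by simp [hxp, hxr]
                  exact List.mem_append_left _ (hinv.closed x hxv this y hy)
              · exact absurd (List.mem_append_right rest hxf) hnp
            · intro x hx
              rcases List.mem_append.mp hx with h | h
              · exact hinv.visSub x h
              · exact Or.inr (hadj p x (hfr_sub x h))
          -- arithmetic invariants
          have hE' : (edge + (ns.length : Int)) + sumW g (rest ++ fresh)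
              = sumW g (vis ++ fresh) := by
            have h1 : sumW g (p :: rest) = ((g.getD p []).length : Int) + sumW g rest :=
              sumW_cons g p rest
            rw [sumW_append, sumW_append]
            rw [h1] at hE
            have : ((g.getD p []).length : Int) = (ns.length : Int) := by rw [hns]
            omega
          have hC' : (cyc || decide (fresh.length ≠ ns.length))
              = decide ((edge + (ns.length : Int)) ≠ ((vis ++ fresh).length : Int) - 1) := by
            rw [List.length_append]
            cases hcy : cyc with
            | false =>
                rw [hcy] at hC
                have hedge : ¬ (edge ≠ (vis.length : Int) - 1) := by simpa using hC.symm
                simp only [Bool.false_or]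
                exact decide_eq_decide.mpr (by omega)
            | true =>
                rw [hcy] at hC
                have hedge : edge ≠ (vis.length : Int) - 1 := by simpa using hC.symm
                simp only [Bool.true_or]
                exact (decide_eq_true (by omega : (edge + (ns.length : Int))
                  ≠ ((vis.length + fresh.length : Nat) : Int) - 1)).symm
          have hle' : (((vis ++ fresh).length : Int)) - 1 ≤ edge + (ns.length : Int) := by
            rw [List.length_append]
            omega
          have hfuel' : (rest ++ fresh).length
              + 2 * ((PySem.List.dedup U).filter (fun x => decide (x ∉ vis ++ fresh))).length
              ≤ f := by
            have hdrop := unvisited_drop (PySem.List.dedup U) vis fresh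
              (by rw [PySem.List.dedup_eq_ofList]; exact PySem.Set.nodup_ofList U) hfnd
              (by
                intro x hx
                rw [PySem.List.dedup_eq_ofList, PySem.Set.mem_ofList]
                exact hadj p x (hfr_sub x hx))
              hfr_nvis
            simp only [List.length_append, List.length_cons] at hfuel ⊢
            omega
          obtain ⟨vis', hrun, hnd'', hchar⟩ := ih (rest ++ fresh) (vis ++ fresh)
            (edge + (ns.length : Int)) (cyc || decide (fresh.length ≠ ns.length))
            hinv' hE' hC' hle' hfuel'
          refine ⟨vis', ?_, hnd'', ?_⟩
          · rw [show bfsA g (f + 1) (p :: rest) vis edge cyc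
                = bfsA g f (rest ++ fresh) (vis ++ fresh) (edge + (ns.length : Int))
                    (cyc || decide (fresh.length ≠ ns.length)) from ?_]
            · exact hrun
            · show bfsA g f
                (((g.getD p []).foldl
                  (fun (s : List Int × PySem.Set Int × Int × Bool) nxt =>
                    if s.2.1.contains nxt then (s.1, s.2.1, s.2.2.1 + 1, true)
                    else (s.1 ++ [nxt], s.2.1.add nxt, s.2.2.1 + 1, s.2.2.2))
                  (rest, vis, edge, cyc)).1) _ _ _ = _
              rw [innerA]
          · intro x
            have hcl' : ∀ z ∈ vis, z ∉ rest → z ≠ p → ∀ y ∈ g.getD z [], y ∈ vis := by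
              intro z hz hzr hzp y hy
              exact hinv.closed z hz (by simp [hzp, hzr]) y hy
            have hfe := frontier_exchange g vis fresh rest p hp_vis hcl' hadjp hfr_sub x
            rw [hchar x]
            simp only [List.mem_append, List.mem_cons] at hfe ⊢
            exact hfe

lemma dfsB_run (g : PySem.Dict Int (List Int)) (U : List Int) (s0 : Int)
    (hadj : ∀ x y, y ∈ g.getD x [] → y ∈ U) :
    ∀ fuel (pend vis : List Int),
    TInv g U s0 vis pend →
    pend.length + 2 * ((PySem.List.dedup U).filter (fun x => decide (x ∉ vis))).length ≤ fuel →
    ∃ vis' : List Int,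
      dfsB g fuel pend vis = some vis' ∧
      vis'.Nodup ∧ (∀ x, x ∈ vis' ↔ x ∈ vis ∨ ∃ p, p ∈ pend ∧ Reach g p x) := by
  intro fuel
  induction fuel with
  | zero =>
      intro pend vis hinv hfuel
      cases pend with
      | nil => exact ⟨vis, dfsB_done g 0 vis, hinv.visNd, by simp⟩
      | cons s stack => simp at hfuel
  | succ f ih =>
      intro pend vis hinv hfuel
      cases pend with
      | nil => exact ⟨vis, dfsB_done g (f + 1) vis, hinv.visNd, by simp⟩
      | cons s stack =>
          obtain ⟨ys, y, hL⟩ : ∃ ys y, s :: stack = ys ++ [y] := by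
            rcases List.eq_nil_or_concat (s :: stack) with h | ⟨ys, y, h⟩
            · exact absurd h (List.cons_ne_nil s stack)
            · exact ⟨ys, y, by simpa using h⟩
          have hx : (s :: stack).getLastD 0 = y := by rw [hL]; exact List.getLastD_concat
          have hdl : (s :: stack).dropLast = ys := by rw [hL]; exact List.dropLast_concat
          set ns := g.getD y [] with hns
          set fresh := freshOf vis ns with hfresh
          have hfr_sub : ∀ z ∈ fresh, z ∈ ns := fun z hz => freshOf_sub ns vis z hz
          have hfr_nvis : ∀ z ∈ fresh, z ∉ vis := fun z hz => freshOf_not_vis ns vis z hz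
          have hmem : ∀ x, x ∈ vis ++ fresh ↔ x ∈ vis ∨ x ∈ ns :=
            fun x => mem_append_freshOf ns vis x
          have hnd' : (vis ++ fresh).Nodup := nodup_append_freshOf ns vis hinv.visNd
          have hfnd : fresh.Nodup := hnd'.of_append_right
          have hy_pend : y ∈ s :: stack := by rw [hL]; exact List.mem_append_right ys List.mem_cons_self
          have hy_vis : y ∈ vis := hinv.pendSub y hy_pend
          have hpendNd : (ys ++ [y]).Nodup := hL ▸ hinv.pendNd
          have hysNd : ys.Nodup := (List.nodup_append.mp hpendNd).1
          have hynotys : y ∉ ys := by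
            intro h
            exact (List.nodup_append.mp hpendNd).2.2 y h y List.mem_cons_self rfl
          have hadjp : ∀ z ∈ ns, z ∈ vis ∨ z ∈ fresh := by
            intro z hz
            exact List.mem_append.mp ((hmem z).mpr (Or.inr hz))
          have hinv' : TInv g U s0 (vis ++ fresh) (ys ++ fresh) := by
            refine ⟨hnd', ?_, ?_, ?_, ?_⟩
            · rw [List.nodup_append]
              refine ⟨hysNd, hfnd, fun a ha b hb hab => ?_⟩
              exact hfr_nvis b hb (hab ▸ hinv.pendSub a (by rw [hL]; exact List.mem_append_left _ ha))
            · intro q hq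
              rcases List.mem_append.mp hq with h | h
              · exact List.mem_append_left _ (hinv.pendSub q (by rw [hL]; exact List.mem_append_left _ h))
              · exact List.mem_append_right _ h
            · intro x hx hnp z hz
              rcases List.mem_append.mp hx with hxv | hxf
              · by_cases hxy : x = y
                · subst hxy
                  exact (hmem z).mpr (Or.inr hz)
                · have hxr : x ∉ ys := fun h => hnp (List.mem_append_left _ h)
                  have : x ∉ s :: stack := by
                    rw [hL]
                    simp [hxy, hxr]
                  exact List.mem_append_left _ (hinv.closed x hxv this z hz)
              · exact absurd (List.mem_append_right ys hxf) hnp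
            · intro x hx
              rcases List.mem_append.mp hx with h | h
              · exact hinv.visSub x h
              · exact Or.inr (hadj y x (hfr_sub x h))
          have hfuel' : (ys ++ fresh).length
              + 2 * ((PySem.List.dedup U).filter (fun x => decide (x ∉ vis ++ fresh))).length
              ≤ f := by
            have hdrop := unvisited_drop (PySem.List.dedup U) vis fresh
              (by rw [PySem.List.dedup_eq_ofList]; exact PySem.Set.nodup_ofList U) hfnd
              (by
                intro x hx
                rw [PySem.List.dedup_eq_ofList, PySem.Set.mem_ofList]
                exact hadj y x (hfr_sub x hx))
              hfr_nvis
            have hlen : (s :: stack).length = ys.length + 1 := by rw [hL]; simp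
            simp only [List.length_append, List.length_cons] at hfuel hlen ⊢
            omega
          obtain ⟨vis', hrun, hnd'', hchar⟩ := ih (ys ++ fresh) (vis ++ fresh) hinv' hfuel'
          refine ⟨vis', ?_, hnd'', ?_⟩
          · rw [show dfsB g (f + 1) (s :: stack) vis = dfsB g f (ys ++ fresh) (vis ++ fresh) from ?_]
            · exact hrun
            · show dfsB g f
                (((g.getD ((s :: stack).getLastD 0) []).foldl
                  (fun (s : List Int × PySem.Set Int) z =>
                    if s.2.contains z then s else (s.1 ++ [z], s.2.add z))
                  ((s :: stack).dropLast, vis)).1) _ = _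
              rw [hx, hdl, innerB]
          · intro x
            have hcl' : ∀ z ∈ vis, z ∉ ys → z ≠ y → ∀ w ∈ g.getD z [], w ∈ vis := by
              intro z hz hzr hzp w hw
              refine hinv.closed z hz ?_ w hw
              rw [hL]
              simp [hzr, hzp]
            have hfe := frontier_exchange g vis fresh ys y hy_vis hcl' hadjp hfr_sub x
            rw [hchar x, hL]
            simp only [List.mem_append, List.mem_singleton] at hfe ⊢
            constructor
            · intro h
              rcases hfe.mp (by tauto) with h2 | ⟨q, hq, hr⟩
              · exact Or.inl h2
              · exact Or.inr ⟨q, by tauto, hr⟩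
            · intro h
              have h2 : (x ∈ vis ∨ x ∈ fresh) ∨ ∃ q, (q ∈ ys ∨ q ∈ fresh) ∧ Reach g q x := by
                refine hfe.mpr ?_
                rcases h with h | ⟨q, hq, hr⟩
                · exact Or.inl h
                · exact Or.inr ⟨q, by tauto, hr⟩
              tauto

-- per start node, A's check and B's region-based classification agree
lemma classify_eq (g : PySem.Dict Int (List Int)) (U : List Int) (c : Int) (fuel : Nat)
    (hadj : ∀ x y, y ∈ g.getD x [] → y ∈ U)
    (hfuel : 1 + 2 * (PySem.List.dedup U).length ≤ fuel) :
    ∃ n m : Int, regionB g fuel c = some (n, m) ∧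
      checkA g fuel c = (if m = n - 1 then 2 else if m = n then 1 else 3) := by
  have hvis0 : PySem.Set.add PySem.Set.empty c = [c] := rfl
  have hinv : TInv g U c [c] [c] := by
    refine ⟨List.nodup_singleton c, List.nodup_singleton c, fun p hp => hp, ?_, ?_⟩
    · intro x hx hnx
      exact absurd hx hnx
    · intro x hx
      exact Or.inl (by simpa using hx)
  have hfuel' : ([c] : List Int).length
      + 2 * ((PySem.List.dedup U).filter (fun x => decide (x ∉ ([c] : List Int)))).length
      ≤ fuel := by
    have := List.length_filter_le (fun x => decide (x ∉ ([c] : List Int))) (PySem.List.dedup U)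
    simp only [List.length_cons, List.length_nil]
    omega
  obtain ⟨visA, hrunA, hndA, hcharA⟩ := bfsA_run g U c hadj fuel [c] [c] 0 false hinv
    (by omega) (by norm_num) (by norm_num) hfuel'
  obtain ⟨visB, hrunB, hndB, hcharB⟩ := dfsB_run g U c hadj fuel [c] [c] hinv hfuel'
  have hperm : visA.Perm visB :=
    (List.perm_ext_iff_of_nodup hndA hndB).mpr (fun a => by rw [hcharA, hcharB])
  have hn : visA.length = visB.length := hperm.length_eq
  have hm : sumW g visA = sumW g visB := (hperm.map _).sum_eq
  refine ⟨(visB.length : Int), sumW g visB, ?_, ?_⟩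
  · rw [regionB, hvis0, hrunB]
    rfl
  · rw [checkA, hvis0, hrunA]
    show (if (decide (sumW g visA ≠ (visA.length : Int) - 1)) = false then 2
        else if ((visA.length : Int)) = sumW g visA then (1 : Int) else 3) = _
    by_cases h1 : sumW g visA = (visA.length : Int) - 1
    · have h1' : sumW g visB = (visB.length : Int) - 1 := by rw [← hm, ← hn]; exact h1
      simp [h1, h1']
    · have h1' : ¬ sumW g visB = (visB.length : Int) - 1 := by rw [← hm, ← hn]; exact h1
      by_cases h2 : ((visA.length : Int)) = sumW g visA
      · have h2' : sumW g visB = (visB.length : Int) := by rw [← hm, ← hn]; exact h2.symm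
        simp only [h2, h2']
        simp [h2']
        rw [if_neg (by omega), if_neg (by omega)]
      · have h2' : ¬ sumW g visB = (visB.length : Int) := by
          rw [← hm, ← hn]
          exact fun h => h2 h.symm
        simp [h1, h1', h2, h2']

-- ---- builder characterizations ----
def setF (s : PySem.Set Int) (e : List Int) : PySem.Set Int :=
  match e with
  | [u, v] => (s.add u).add v
  | _ => s
def graphF (d : PySem.Dict Int (List Int)) (e : List Int) : PySem.Dict Int (List Int) :=
  match e with
  | [u, v] => d.modify u [] (fun l => l ++ [v])
  | _ => d
def degF (d : PySem.Dict Int Int) (e : List Int) : PySem.Dict Int Int :=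
  match e with
  | [_, v] => d.modify v 0 (fun n => n + 1)
  | _ => d

lemma adjOf_cons2 (u v x : Int) (es : List (List Int)) :
    adjOf ([u, v] :: es) x = if u = x then v :: adjOf es x else adjOf es x := by
  simp only [adjOf, List.filterMap_cons]
  by_cases hux : u = x <;> simp [hux]

def pairF (p : PySem.Dict Int (List Int) × PySem.Dict Int Int) (e : List Int) :
    PySem.Dict Int (List Int) × PySem.Dict Int Int :=
  (graphF p.1 e, degF p.2 e)

lemma modify_eq_insert {ν : Type} (d : PySem.Dict Int ν) (k : Int) (d0 : ν) (f : ν → ν) :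
    d.modify k d0 f = d.insert k (f (d.getD k d0)) := rfl

lemma buildA_eq (edges : List (List Int)) :
    buildA edges = (edges.foldl setF PySem.Set.empty,
      edges.foldl graphF PySem.Dict.empty, edges.foldl degF PySem.Dict.empty) := by
  have hfun : (fun (st : PySem.Set Int × PySem.Dict Int (List Int) × PySem.Dict Int Int) e =>
      match e with
      | [u, v] =>
          ((st.1.add u).add v,
           st.2.1.modify u [] (fun l => l ++ [v]),
           st.2.2.modify v 0 (fun n => n + 1))
      | _ => st)
      = (fun (st : PySem.Set Int × PySem.Dict Int (List Int) × PySem.Dict Int Int) e =>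
          (setF st.1 e, pairF st.2 e)) := by
    funext st e
    rcases e with - | ⟨u, - | ⟨v, - | ⟨w, t⟩⟩⟩ <;> rfl
  rw [buildA, hfun, PySem.List.foldl_prod_mk]
  show (_, List.foldl (fun (p : PySem.Dict Int (List Int) × PySem.Dict Int Int) e =>
    (graphF p.1 e, degF p.2 e)) (PySem.Dict.empty, PySem.Dict.empty) edges) = _
  rw [PySem.List.foldl_prod_mk]

lemma graphF_getD : ∀ (edges : List (List Int)) (d : PySem.Dict Int (List Int)) (x : Int),
    (edges.foldl graphF d).getD x [] = d.getD x [] ++ adjOf edges x := by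
  intro edges
  induction edges with
  | nil => simp [adjOf]
  | cons e es ih =>
      intro d x
      rw [List.foldl_cons, ih]
      rcases e with - | ⟨u, - | ⟨v, - | ⟨w, t⟩⟩⟩
      · simp [graphF, adjOf]
      · simp [graphF, adjOf]
      · show (d.modify u [] (fun l => l ++ [v])).getD x [] ++ adjOf es x = _
        rw [PySem.Dict.getD_modify, adjOf_cons2]
        by_cases hux : u = x
        · subst hux
          rw [if_pos rfl, if_pos rfl, List.append_assoc]
          rfl
        · rw [if_neg (fun h => hux h.symm), if_neg hux]
      · simp [graphF, adjOf]

lemma degF_getD : ∀ (edges : List (List Int)) (d : PySem.Dict Int Int) (x : Int),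
    (edges.foldl degF d).getD x 0 = d.getD x 0 + ((secOf edges).count x : Int) := by
  intro edges
  induction edges with
  | nil => simp [secOf]
  | cons e es ih =>
      intro d x
      rw [List.foldl_cons, ih]
      rcases e with - | ⟨u, - | ⟨v, - | ⟨w, t⟩⟩⟩
      · simp [degF, secOf]
      · simp [degF, secOf]
      · show (d.modify v 0 (fun n => n + 1)).getD x 0 + _ = _
        rw [PySem.Dict.getD_modify]
        have hsec : secOf ([u, v] :: es) = v :: secOf es := rfl
        rw [hsec, List.count_cons]
        by_cases hvx : x = v
        · subst hvx
          rw [if_pos rfl, if_pos (beq_self_eq_true x)]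
          push_cast
          ring
        · rw [if_neg hvx, if_neg (fun h => hvx (beq_iff_eq.mp h).symm)]
          push_cast
          ring
      · simp [degF, secOf]

lemma graphF_keys : ∀ (edges : List (List Int)) (d : PySem.Dict Int (List Int)) (x : Int),
    x ∈ (edges.foldl graphF d).keys ↔ x ∈ d.keys ∨ x ∈ headsOf edges := by
  intro edges
  induction edges with
  | nil => simp [headsOf]
  | cons e es ih =>
      intro d x
      rw [List.foldl_cons, ih]
      rcases e with - | ⟨u, - | ⟨v, - | ⟨w, t⟩⟩⟩
      · simp [graphF, headsOf]
      · simp [graphF, headsOf]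
      · show x ∈ (d.modify u [] (fun l => l ++ [v])).keys ∨ x ∈ headsOf es ↔ _
        rw [PySem.Dict.keys_modify, PySem.Dict.mem_keys_insert]
        have hh : headsOf ([u, v] :: es) = u :: headsOf es := rfl
        rw [hh]
        simp only [List.mem_cons]
        tauto
      · simp [graphF, headsOf]

lemma setF_mem : ∀ (edges : List (List Int)) (s : PySem.Set Int) (x : Int),
    x ∈ edges.foldl setF s ↔ x ∈ s ∨ x ∈ headsOf edges ∨ x ∈ secOf edges := by
  intro edges
  induction edges with
  | nil => simp [headsOf, secOf]
  | cons e es ih =>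
      intro s x
      rw [List.foldl_cons, ih]
      rcases e with - | ⟨u, - | ⟨v, - | ⟨w, t⟩⟩⟩
      · simp [setF, headsOf, secOf]
      · simp [setF, headsOf, secOf]
      · show x ∈ (s.add u).add v ∨ _ ↔ _
        rw [PySem.Set.mem_add, PySem.Set.mem_add]
        have hh : headsOf ([u, v] :: es) = u :: headsOf es := rfl
        have hs : secOf ([u, v] :: es) = v :: secOf es := rfl
        rw [hh, hs]
        simp only [List.mem_cons]
        tauto
      · simp [setF, headsOf, secOf]

lemma buildB_eq (edges : List (List Int)) : buildB edges = (buildA edges).2 := by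
  have hsd : ∀ (d : PySem.Dict Int (List Int)) (u v : Int),
      (d.setdefault u []).modify u [] (fun l => l ++ [v]) = d.modify u [] (fun l => l ++ [v]) := by
    intro d u v
    cases hc : d.contains u with
    | true => rw [PySem.Dict.setdefault_of_contains d [] hc]
    | false =>
        rw [PySem.Dict.setdefault_of_not_contains d [] hc,
          modify_eq_insert, modify_eq_insert, PySem.Dict.getD_insert_self,
          PySem.Dict.insert_insert_self, PySem.Dict.getD_of_not_contains d [] hc]
  have hfun : (fun (st : PySem.Dict Int (List Int) × PySem.Dict Int Int) e =>
      match e with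
      | [u, v] =>
          ((st.1.setdefault u []).modify u [] (fun l => l ++ [v]),
           st.2.insert v (st.2.getD v 0 + 1))
      | _ => st)
      = (fun (st : PySem.Dict Int (List Int) × PySem.Dict Int Int) e =>
          (graphF st.1 e, degF st.2 e)) := by
    funext st e
    rcases e with - | ⟨u, - | ⟨v, - | ⟨w, t⟩⟩⟩
    · rfl
    · rfl
    · show ((st.1.setdefault u []).modify u [] (fun l => l ++ [v]),
          st.2.insert v (st.2.getD v 0 + 1)) = _
      rw [hsd]
      rfl
    · rfl
  rw [buildB, hfun, PySem.List.foldl_prod_mk, buildA_eq]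

lemma graph_getD (edges : List (List Int)) (x : Int) :
    (buildA edges).2.1.getD x [] = adjOf edges x := by
  rw [buildA_eq]
  show (edges.foldl graphF PySem.Dict.empty).getD x [] = _
  rw [graphF_getD]
  simp

lemma graph_keys (edges : List (List Int)) (x : Int) :
    x ∈ (buildA edges).2.1.keys ↔ x ∈ headsOf edges := by
  rw [buildA_eq]
  show x ∈ (edges.foldl graphF PySem.Dict.empty).keys ↔ _
  rw [graphF_keys]
  simp [PySem.Dict.keys_empty]

lemma deg_getD (edges : List (List Int)) (x : Int) :
    (buildA edges).2.2.getD x 0 = ((secOf edges).count x : Int) := by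
  rw [buildA_eq]
  show (edges.foldl degF PySem.Dict.empty).getD x 0 = _
  rw [degF_getD]
  simp

lemma mem_edgeSet (edges : List (List Int)) (x : Int) :
    x ∈ (buildA edges).1 ↔ x ∈ headsOf edges ∨ x ∈ secOf edges := by
  rw [buildA_eq]
  show x ∈ edges.foldl setF PySem.Set.empty ↔ _
  rw [setF_mem]
  have : x ∈ PySem.Set.empty ↔ False := by simp [PySem.Set.empty]
  tauto

lemma adjOf_length (edges : List (List Int)) (x : Int) :
    (adjOf edges x).length = (headsOf edges).count x := by
  induction edges with
  | nil => simp [adjOf, headsOf]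
  | cons e es ih =>
      rcases e with - | ⟨u, - | ⟨v, - | ⟨w, t⟩⟩⟩
      · simpa [adjOf, headsOf] using ih
      · simpa [adjOf, headsOf] using ih
      · have hh : headsOf ([u, v] :: es) = u :: headsOf es := rfl
        rw [adjOf_cons2, hh, List.count_cons]
        by_cases hux : u = x
        · rw [if_pos hux, if_pos (beq_iff_eq.mpr hux), List.length_cons, ih]
        · rw [if_neg hux, if_neg (fun h => hux (beq_iff_eq.mp h)), ih]
          simp
      · simpa [adjOf, headsOf] using ih

lemma adjOf_mem_secOf (edges : List (List Int)) (x y : Int) (h : y ∈ adjOf edges x) :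
    y ∈ secOf edges := by
  induction edges with
  | nil => simpa [adjOf] using h
  | cons e es ih =>
      rcases e with - | ⟨u, - | ⟨v, - | ⟨w, t⟩⟩⟩
      · exact ih (by simpa [adjOf] using h)
      · exact ih (by simpa [adjOf] using h)
      · have hs : secOf ([u, v] :: es) = v :: secOf es := rfl
        rw [adjOf_cons2] at h
        rw [hs]
        by_cases hux : u = x
        · rw [if_pos hux] at h
          rcases List.mem_cons.mp h with h | h
          · simp [h]
          · exact List.mem_cons_of_mem _ (ih h)
        · rw [if_neg hux] at h
          exact List.mem_cons_of_mem _ (ih h)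
      · exact ih (by simpa [adjOf] using h)

lemma secOf_length_le (edges : List (List Int)) : (secOf edges).length ≤ edges.length :=
  List.length_filterMap_le _ _

-- under the all-length-2 precondition, headsOf / secOf are plain maps
lemma headsOf_eq_map : ∀ (edges : List (List Int)), (∀ e ∈ edges, e.length = 2) →
    headsOf edges = edges.map (fun e => e.headI) := by
  intro edges
  induction edges with
  | nil => intro _; rfl
  | cons e es ih =>
      intro h
      have he : e.length = 2 := h e List.mem_cons_self
      have ih' := ih (fun e2 he2 => h e2 (List.mem_cons_of_mem _ he2))
      rcases e with - | ⟨u, - | ⟨v, - | ⟨w, t⟩⟩⟩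
      · exfalso; simp only [List.length_nil] at he; omega
      · exfalso; simp only [List.length_cons, List.length_nil] at he; omega
      · show u :: headsOf es = u :: _
        rw [ih']
      · exfalso; simp only [List.length_cons] at he; omega

lemma secOf_eq_map : ∀ (edges : List (List Int)), (∀ e ∈ edges, e.length = 2) →
    secOf edges = edges.map (fun e => e.getD 1 0) := by
  intro edges
  induction edges with
  | nil => intro _; rfl
  | cons e es ih =>
      intro h
      have he : e.length = 2 := h e List.mem_cons_self
      have ih' := ih (fun e2 he2 => h e2 (List.mem_cons_of_mem _ he2))
      rcases e with - | ⟨u, - | ⟨v, - | ⟨w, t⟩⟩⟩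
      · exfalso; simp only [List.length_nil] at he; omega
      · exfalso; simp only [List.length_cons, List.length_nil] at he; omega
      · show v :: secOf es = v :: _
        rw [ih']
      · exfalso; simp only [List.length_cons] at he; omega

lemma mem_flatten_of_node (edges : List (List Int)) (h2 : ∀ e ∈ edges, e.length = 2) (x : Int)
    (hx : x ∈ headsOf edges ∨ x ∈ secOf edges) : x ∈ edges.flatten := by
  rcases hx with hx | hx
  · rw [headsOf_eq_map edges h2] at hx
    rcases List.mem_map.mp hx with ⟨e, he, hxe⟩
    have he2 := h2 e he
    rcases e with - | ⟨u, - | ⟨v, - | ⟨w, t⟩⟩⟩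
    · exfalso; simp only [List.length_nil] at he2; omega
    · exfalso; simp only [List.length_cons, List.length_nil] at he2; omega
    · exact List.mem_flatten.mpr ⟨[u, v], he, by
        rw [show ([u, v] : List Int).headI = u from rfl] at hxe
        simp [← hxe]⟩
    · exfalso; simp only [List.length_cons] at he2; omega
  · rw [secOf_eq_map edges h2] at hx
    rcases List.mem_map.mp hx with ⟨e, he, hxe⟩
    have he2 := h2 e he
    rcases e with - | ⟨u, - | ⟨v, - | ⟨w, t⟩⟩⟩
    · exfalso; simp only [List.length_nil] at he2; omega
    · exfalso; simp only [List.length_cons, List.length_nil] at he2; omega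
    · exact List.mem_flatten.mpr ⟨[u, v], he, by
        rw [show ([u, v] : List Int).getD 1 0 = v from rfl] at hxe
        simp [← hxe]⟩
    · exfalso; simp only [List.length_cons] at he2; omega

lemma count_map_headI (edges : List (List Int)) (x : Int) :
    (edges.map (fun e => e.headI)).count x = edges.countP (fun e => e.headI == x) := by
  induction edges with
  | nil => rfl
  | cons e es ih =>
      rw [List.map_cons, List.count_cons, List.countP_cons, ih]

lemma countP_le_one_unique (l : List Int) (p : Int → Bool) (hnd : l.Nodup)
    (hle : l.countP p ≤ 1) :
    ∀ a ∈ l, ∀ b ∈ l, p a = true → p b = true → a = b := by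
  intro a ha b hb hpa hpb
  have haf : a ∈ l.filter p := List.mem_filter.mpr ⟨ha, hpa⟩
  have hbf : b ∈ l.filter p := List.mem_filter.mpr ⟨hb, hpb⟩
  rw [List.countP_eq_length_filter] at hle
  match hf : l.filter p with
  | [] => rw [hf] at haf; exact absurd haf (List.not_mem_nil)
  | [x] =>
      rw [hf] at haf hbf
      rw [List.mem_singleton.mp haf, List.mem_singleton.mp hbf]
  | x :: y :: t => rw [hf] at hle; simp at hle

-- ---- candidate selection ----
lemma foldl_pick_none {P : Int → Prop} [DecidablePred P] :
    ∀ (l : List Int) (a : Int), (∀ x ∈ l, ¬ P x) →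
      l.foldl (fun acc i => if P i then i else acc) a = a := by
  intro l
  induction l with
  | nil => intro a _; rfl
  | cons x l ih =>
      intro a h
      rw [List.foldl_cons, if_neg (h x List.mem_cons_self)]
      exact ih a fun z hz => h z (List.mem_cons_of_mem _ hz)

lemma foldl_pick_last {P : Int → Prop} [DecidablePred P] (c : Int) :
    ∀ (l : List Int) (a : Int), (∀ x ∈ l, P x → x = c) → c ∈ l → P c →
      l.foldl (fun acc i => if P i then i else acc) a = c := by
  intro l
  induction l with
  | nil => intro a _ hc _; exact absurd hc (List.not_mem_nil)
  | cons x l ih =>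
      intro a huni hc hPc
      rw [List.foldl_cons]
      by_cases hcl : c ∈ l
      · exact ih _ (fun z hz => huni z (List.mem_cons_of_mem _ hz)) hcl hPc
      · have hcx : c = x := ((List.mem_cons.mp hc).resolve_right hcl)
        subst hcx
        rw [if_pos hPc]
        exact foldl_pick_none l c fun z hz hPz =>
          hcl ((huni z (List.mem_cons_of_mem _ hz) hPz) ▸ hz)

lemma find?_unique {P : Int → Bool} (c : Int) :
    ∀ (l : List Int), (∀ x ∈ l, P x = true → x = c) → c ∈ l → P c = true →
      l.find? P = some c := by
  intro l
  induction l with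
  | nil => intro _ hc _; exact absurd hc (List.not_mem_nil)
  | cons x l ih =>
      intro huni hc hPc
      by_cases hP : P x = true
      · rw [List.find?_cons_of_pos hP, huni x List.mem_cons_self hP]
      · rw [List.find?_cons_of_neg (by simpa using hP)]
        have hcx : c ≠ x := fun h => hP (h ▸ hPc)
        exact ih (fun z hz => huni z (List.mem_cons_of_mem _ hz))
          ((List.mem_cons.mp hc).resolve_left hcx) hPc

-- ===== VERDICT (by name: the statement is the Claim_ definition above) =====
theorem solution_spec : Claim_equal_solution := by
  intro edges _hdom hpre
  obtain ⟨hlen2, huniq⟩ := hpre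
  show solution edges = solution_alt edges
  simp only [solution, solution_alt, buildB_eq edges]
  set S := (buildA edges).1 with hSdef
  set g := (buildA edges).2.1 with hgdef
  set d := (buildA edges).2.2 with hddef
  -- graph edges point into secOf
  have hadj : ∀ x y, y ∈ g.getD x [] → y ∈ secOf edges := by
    intro x y hy
    rw [hgdef, graph_getD] at hy
    exact adjOf_mem_secOf edges x y hy
  have hfuelB : 1 + 2 * (PySem.List.dedup (secOf edges)).length ≤ 2 * edges.length + 1 := by
    have h1 := dedup_length_le (secOf edges)
    have h2 := secOf_length_le edges
    omega
  -- the two per-node counting steps agree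
  have hstep : ∀ (acc : Int × Int × Int) (node : Int),
      (match checkA g (2 * edges.length + 1) node with
       | 1 => (acc.1 + 1, acc.2.1, acc.2.2)
       | 2 => (acc.1, acc.2.1 + 1, acc.2.2)
       | _ => (acc.1, acc.2.1, acc.2.2 + 1))
      = (match regionB g (2 * edges.length + 1) node with
         | none => acc
         | some (n, m) =>
            if m = n - 1 then (acc.1, acc.2.1 + 1, acc.2.2)
            else if m = n then (acc.1 + 1, acc.2.1, acc.2.2)
            else (acc.1, acc.2.1, acc.2.2 + 1)) := by
    intro acc node
    obtain ⟨n, m, hreg, hchk⟩ :=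
      classify_eq g (secOf edges) node (2 * edges.length + 1) hadj hfuelB
    rw [hreg, hchk]
    show (match (if m = n - 1 then (2 : Int) else if m = n then 1 else 3) with
          | 1 => (acc.1 + 1, acc.2.1, acc.2.2)
          | 2 => (acc.1, acc.2.1 + 1, acc.2.2)
          | _ => (acc.1, acc.2.1, acc.2.2 + 1))
        = (if m = n - 1 then (acc.1, acc.2.1 + 1, acc.2.2)
           else if m = n then (acc.1 + 1, acc.2.1, acc.2.2)
           else (acc.1, acc.2.1, acc.2.2 + 1))
    by_cases h1 : m = n - 1
    · rw [if_pos h1, if_pos h1]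
      rfl
    · rw [if_neg h1, if_neg h1]
      by_cases h2 : m = n
      · rw [if_pos h2, if_pos h2]
        rfl
      · rw [if_neg h2, if_neg h2]
        rfl
  have hcnt : ∀ a0 : Int,
      (g.getD a0 []).foldl
        (fun (c : Int × Int × Int) node =>
          match checkA g (2 * edges.length + 1) node with
          | 1 => (c.1 + 1, c.2.1, c.2.2)
          | 2 => (c.1, c.2.1 + 1, c.2.2)
          | _ => (c.1, c.2.1, c.2.2 + 1)) (0, 0, 0)
      = (g.getD a0 []).foldl
        (fun (c : Int × Int × Int) ch =>
          match regionB g (2 * edges.length + 1) ch with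
          | none => c
          | some (n, m) =>
              if m = n - 1 then (c.1, c.2.1 + 1, c.2.2)
              else if m = n then (c.1 + 1, c.2.1, c.2.2)
              else (c.1, c.2.1, c.2.2 + 1)) (0, 0, 0) := by
    intro a0
    exact List.foldl_ext _ _ _ (fun acc b _ => hstep acc b)
  -- candidate characterization
  have e1 : ∀ i : Int, d.getD i 0 = ((secOf edges).count i : Int) := by
    intro i; rw [hddef]; exact deg_getD edges i
  have e2 : ∀ i : Int, (g.getD i []).length = edges.countP (fun e => e.headI == i) := by
    intro i
    rw [hgdef, graph_getD, adjOf_length, headsOf_eq_map edges hlen2]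
    exact count_map_headI edges i
  have e4 : ∀ i : Int, ((secOf edges).count i = 0)
      ↔ (edges.all (fun e => e.getD 1 0 != i) = true) := by
    intro i
    rw [List.count_eq_zero, secOf_eq_map edges hlen2]
    simp only [List.mem_map, not_exists, not_and, List.all_eq_true, bne_iff_ne, ne_eq]
  have hcandP : ∀ i : Int,
      (d.getD i 0 = 0 ∧ (g.getD i []).length ≠ 1) ↔ candP edges i = true := by
    intro i
    rw [candP, Bool.and_eq_true, e1, e2]
    constructor
    · rintro ⟨h1, h2⟩
      refine ⟨(e4 i).mp (by exact_mod_cast h1), ?_⟩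
      simpa [bne_iff_ne] using h2
    · rintro ⟨h1, h2⟩
      refine ⟨by exact_mod_cast (e4 i).mpr h1, ?_⟩
      simpa [bne_iff_ne] using h2
  have huniq' : ∀ a b : Int, a ∈ S → (d.getD a 0 = 0 ∧ (g.getD a []).length ≠ 1) →
      b ∈ S → (d.getD b 0 = 0 ∧ (g.getD b []).length ≠ 1) → a = b := by
    intro a b ha hPa hb hPb
    have hnd : (PySem.List.dedup edges.flatten).Nodup := by
      rw [PySem.List.dedup_eq_ofList]; exact PySem.Set.nodup_ofList _
    have hna : a ∈ PySem.List.dedup edges.flatten := by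
      rw [PySem.List.dedup_eq_ofList, PySem.Set.mem_ofList]
      exact mem_flatten_of_node edges hlen2 a ((mem_edgeSet edges a).mp (hSdef ▸ ha))
    have hnb : b ∈ PySem.List.dedup edges.flatten := by
      rw [PySem.List.dedup_eq_ofList, PySem.Set.mem_ofList]
      exact mem_flatten_of_node edges hlen2 b ((mem_edgeSet edges b).mp (hSdef ▸ hb))
    exact countP_le_one_unique _ _ hnd huniq a hna b hnb
      ((hcandP a).mp hPa) ((hcandP b).mp hPb)
  have hkeysS : ∀ i : Int, i ∈ g.keys → i ∈ S := by
    intro i hi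
    rw [hSdef]
    exact (mem_edgeSet edges i).mpr (Or.inl ((graph_keys edges i).mp (hgdef ▸ hi)))
  have hPkeys : ∀ i : Int, i ∈ S →
      (d.getD i 0 = 0 ∧ (g.getD i []).length ≠ 1) → i ∈ g.keys := by
    intro i hi hPi
    rw [hgdef]
    refine (graph_keys edges i).mpr ?_
    rcases (mem_edgeSet edges i).mp (hSdef ▸ hi) with h | h
    · exact h
    · exfalso
      have h1 := hPi.1
      rw [e1] at h1
      exact (List.count_eq_zero.mp (by exact_mod_cast h1)) h
  have hPb : ∀ i : Int, ((d.getD i 0 == 0 && (g.getD i []).length != 1) = true)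
      ↔ (d.getD i 0 = 0 ∧ (g.getD i []).length ≠ 1) := by
    intro i
    simp [Bool.and_eq_true, beq_iff_eq, bne_iff_ne]
  by_cases hex : ∃ i, i ∈ S ∧ (d.getD i 0 = 0 ∧ (g.getD i []).length ≠ 1)
  · obtain ⟨c, hcS, hPc⟩ := hex
    have ha0 : S.foldl
        (fun acc i => if d.getD i 0 = 0 ∧ (g.getD i []).length ≠ 1 then i else acc) 0 = c :=
      foldl_pick_last c S 0 (fun x hx hPx => huniq' x c hx hPx hcS hPc) hcS hPc
    have hfind : g.keys.find? (fun u => d.getD u 0 == 0 && (g.getD u []).length != 1)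
        = some c := by
      refine find?_unique c g.keys ?_ (hPkeys c hcS hPc) ((hPb c).mpr hPc)
      intro x hx hx2
      exact huniq' x c (hkeysS x hx) ((hPb x).mp hx2) hcS hPc
    rw [ha0, hfind, hcnt c]
  · have hex' : ∀ x : Int, x ∈ S → ¬ (d.getD x 0 = 0 ∧ (g.getD x []).length ≠ 1) :=
      fun x hx hP => hex ⟨x, hx, hP⟩
    have ha0 : S.foldl
        (fun acc i => if d.getD i 0 = 0 ∧ (g.getD i []).length ≠ 1 then i else acc) 0 = 0 :=
      foldl_pick_none S 0 hex'
    have hfind : g.keys.find? (fun u => d.getD u 0 == 0 && (g.getD u []).length != 1)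
        = none := by
      refine List.find?_eq_none.mpr ?_
      intro x hx hx2
      exact hex' x (hkeysS x hx) ((hPb x).mp hx2)
    rw [ha0, hfind, hcnt 0]
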